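-- pv_equiv track=rewrite | github.com/louwrentius/fio-plot | fio_plot/fiolib/tables.py | get_host_metric_data
-- ===== SOURCE A (Python) =====
-- def get_host_metric_data(data):
--     returndata = []
--     counter = 1
--     hostcounter = 0
--     divide = int(len(data["hostname_series"]) / len(data["x_axis"])) # that int convert should work
--     for host in data["hostname_series"]:
--         hostcounter += 1
--         metricvalue = data["x_axis"][counter-1]
--         returndata.append({ "hostname": host, "value": metricvalue })
--         if hostcounter % divide == 0:
--             counter += 1
--     return returndata
-- ===== SOURCE B (Python) =====
-- def get_host_metric_data(data):
--     hosts = data["hostname_series"]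
--     xs = data["x_axis"]
--     divide = int(len(hosts) / len(xs))
--     returndata = []
--     for i, value in enumerate(xs):
--         for host in hosts[i * divide:(i + 1) * divide]:
--             returndata.append({"hostname": host, "value": value})
--     return returndata
-- ===== Notes on version B (the rewrite author's own statement) =====
-- stated objective: alternative
-- what changed: A makes one pass over hostname_series driving a counter/hostcounter state machine advanced by a '% divide' test; B instead loops over x_axis and, for each entry, slices out the corresponding block hosts[i*divide:(i+1)*divide] and emits it in an inner loop, so no per-host counter state exists.
import Mathlib
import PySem

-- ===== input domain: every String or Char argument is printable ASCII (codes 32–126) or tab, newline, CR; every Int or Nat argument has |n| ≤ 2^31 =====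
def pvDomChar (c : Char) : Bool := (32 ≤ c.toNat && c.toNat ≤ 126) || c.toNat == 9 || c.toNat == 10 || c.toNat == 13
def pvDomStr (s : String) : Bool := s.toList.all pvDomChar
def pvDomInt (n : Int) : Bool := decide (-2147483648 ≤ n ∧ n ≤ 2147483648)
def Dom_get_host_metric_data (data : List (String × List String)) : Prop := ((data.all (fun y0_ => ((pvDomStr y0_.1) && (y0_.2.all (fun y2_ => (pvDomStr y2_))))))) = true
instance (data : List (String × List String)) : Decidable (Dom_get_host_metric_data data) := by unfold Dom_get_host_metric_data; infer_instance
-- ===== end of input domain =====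

-- B replaces A's single pass over hosts with a counter/'% divide' state machine by a nested
-- traversal: outer loop over x_axis, inner loop over the slice of hosts belonging to that
-- x_axis entry (alternative decomposition; same values, same order).

-- ===== PORT A =====
-- dict parameter: first-match association-list lookup (Python dict access; missing key = KeyError, excluded by Pre_)
def pvLookup (data : List (String × List String)) (k : String) : List String :=
  (List.lookup k data).getD []

-- one iteration of A's for-loop; state = (counter, hostcounter, returndata)
def pvStepA (x : List String) (divide : Int)
    (st : Int × Int × List (List (String × String))) (host : String) :
    Int × Int × List (List (String × String)) :=
  let hostcounter := st.2.1 + 1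
  let metricvalue := PySem.List.pyGetD x (st.1 - 1) ""   -- x_axis[counter-1]; in range under Pre_
  let acc := st.2.2 ++ [[("hostname", host), ("value", metricvalue)]]
  if PySem.Int.mod hostcounter divide = 0 then (st.1 + 1, hostcounter, acc)
  else (st.1, hostcounter, acc)

def get_host_metric_data (data : List (String × List String)) : List (List (String × String)) :=
  let hosts := pvLookup data "hostname_series"
  let x := pvLookup data "x_axis"
  let divide : Int := PySem.Int.floordiv (hosts.length : Int) (x.length : Int)
  (hosts.foldl (pvStepA x divide) (1, 0, [])).2.2

-- ===== PORT B =====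
-- B's inner loop body: append the chunk hosts[i*divide:(i+1)*divide] tagged with value p.2
def pvStepB (hosts : List String) (divide : Int)
    (acc : List (List (String × String))) (p : Int × String) :
    List (List (String × String)) :=
  acc ++ (PySem.List.slice hosts (some (p.1 * divide)) (some ((p.1 + 1) * divide))).map
    (fun host => [("hostname", host), ("value", p.2)])

def get_host_metric_data_alt (data : List (String × List String)) : List (List (String × String)) :=
  let hosts := pvLookup data "hostname_series"
  let x := pvLookup data "x_axis"
  let divide : Int := PySem.Int.floordiv (hosts.length : Int) (x.length : Int)
  (PySem.List.enumerate x 0).foldl (pvStepB hosts divide) []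

-- ===== PRECONDITION & SPEC =====
-- Pre_ = exactly the inputs on which A returns: both keys present (else KeyError), x_axis nonempty
-- (else ZeroDivisionError), and len(x_axis) divides len(hostname_series) (else the '% divide' or the
-- index counter-1 raises ZeroDivisionError/IndexError).
def Pre_get_host_metric_data (data : List (String × List String)) : Prop :=
  (List.lookup "hostname_series" data).isSome = true ∧
  (List.lookup "x_axis" data).isSome = true ∧
  0 < (pvLookup data "x_axis").length ∧
  (pvLookup data "x_axis").length ∣ (pvLookup data "hostname_series").length
instance (data : List (String × List String)) : Decidable (Pre_get_host_metric_data data) := by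
  unfold Pre_get_host_metric_data; infer_instance

def pvWitness_get_host_metric_data : (List (String × List String)) :=
  [("hostname_series", ["alpha", "beta"]), ("x_axis", ["1"])]

def Spec_get_host_metric_data (data : List (String × List String)) (out : List (List (String × String))) : Prop := out = get_host_metric_data_alt data
instance (data : List (String × List String)) (out : List (List (String × String))) : Decidable (Spec_get_host_metric_data data out) := by unfold Spec_get_host_metric_data; infer_instance

-- ===== CLAIM (what is proved, stated in full; the proofs are below) =====
def Claim_equal_get_host_metric_data : Prop := ∀ (data : List (String × List String)), Dom_get_host_metric_data data → Pre_get_host_metric_data data → Spec_get_host_metric_data data (get_host_metric_data data)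

-- ===== LEMMAS AND PROOFS =====

-- common closed form both loops are proved equal to
def pvForm (x : List String) (d : Int) (hs : List (Int × String)) : List (List (String × String)) :=
  hs.map (fun p => [("hostname", p.2), ("value", PySem.List.pyGetD x (PySem.Int.floordiv p.1 d) "")])

-- arithmetic: floor-division steps by one exactly at multiples of d
lemma pv_ediv_succ_of_dvd {d k : Int} (hd : 1 ≤ d) (h : d ∣ (k + 1)) :
    (k + 1) / d = k / d + 1 := by
  obtain ⟨q, hq⟩ := h
  have hk : k = (d - 1) + d * (q - 1) := by linarith
  have h1 : (k + 1) / d = q := by rw [hq, Int.mul_ediv_cancel_left _ (by omega)]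
  have h2 : k / d = q - 1 := by
    rw [hk, Int.add_mul_ediv_left _ _ (show d ≠ 0 by omega),
      Int.ediv_eq_zero_of_lt (by omega) (by omega)]
    ring
  omega

lemma pv_ediv_succ_of_not_dvd {d k : Int} (hd : 1 ≤ d) (h : ¬ d ∣ (k + 1)) :
    (k + 1) / d = k / d := by
  have hr0 : 0 ≤ k % d := Int.emod_nonneg k (by omega)
  have hrd : k % d < d := Int.emod_lt_of_pos k (by omega)
  have hkd : d * (k / d) + k % d = k := (Int.mul_ediv_add_emod k d)
  have hne : k % d + 1 ≠ d := by
    intro hEq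
    exact h ⟨k / d + 1, by linarith⟩
  have hk1 : k + 1 = (k % d + 1) + d * (k / d) := by omega
  rw [hk1, Int.add_mul_ediv_left _ _ (show d ≠ 0 by omega),
    Int.ediv_eq_zero_of_lt (by omega) (by omega)]
  ring

-- A's loop, started at step k with consistent state, appends exactly the closed form over the rest
lemma pv_loop_eq (x : List String) (d : Int) (hd : 1 ≤ d) :
    ∀ (h : List String) (k : Nat) (acc : List (List (String × String))),
      (h.foldl (pvStepA x d) ((k : Int) / d + 1, (k : Int), acc)).2.2 =
      acc ++ pvForm x d (PySem.List.enumerate h (k : Int)) := by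
  intro h
  induction h with
  | nil => intro k acc; simp [PySem.List.enumerate_nil, pvForm]
  | cons host t ih =>
    intro k acc
    have hfd : PySem.Int.floordiv (k : Int) d = (k : Int) / d :=
      PySem.Int.floordiv_eq_ediv_of_pos (by omega)
    have hdvd : PySem.Int.mod ((k : Int) + 1) d = 0 ↔ d ∣ ((k : Int) + 1) :=
      PySem.Int.mod_eq_zero_iff_dvd _ _
    rw [PySem.List.enumerate_cons]
    simp only [List.foldl_cons, pvForm, List.map_cons]
    by_cases hc : d ∣ ((k : Int) + 1)
    · have hstep : pvStepA x d ((k : Int) / d + 1, (k : Int), acc) host =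
          (((k : Int) + 1) / d + 1, (k : Int) + 1,
            acc ++ [[("hostname", host), ("value", PySem.List.pyGetD x ((k : Int) / d) "")]]) := by
        simp only [pvStepA, hdvd.mpr hc]
        rw [pv_ediv_succ_of_dvd hd hc]
        simp
      rw [hstep]
      have hcast : ((k : Int) + 1) = ((k + 1 : Nat) : Int) := by push_cast; ring
      rw [hcast, ih (k + 1)]
      simp [pvForm, hfd]
    · have hstep : pvStepA x d ((k : Int) / d + 1, (k : Int), acc) host =
          (((k : Int) + 1) / d + 1, (k : Int) + 1,
            acc ++ [[("hostname", host), ("value", PySem.List.pyGetD x ((k : Int) / d) "")]]) := by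
        have hm : ¬ PySem.Int.mod ((k : Int) + 1) d = 0 := fun hEq => hc (hdvd.mp hEq)
        simp only [pvStepA, if_neg (by simpa using hm)]
        rw [pv_ediv_succ_of_not_dvd hd hc]
        simp
      rw [hstep]
      have hcast : ((k : Int) + 1) = ((k + 1 : Nat) : Int) := by push_cast; ring
      rw [hcast, ih (k + 1)]
      simp [pvForm, hfd]

-- B's loop over the x-suffix from position k appends exactly the closed form over hosts from k*d on
lemma pv_loopB (x hosts : List String) (d : Nat)
    (hlen : hosts.length = x.length * d) :
    ∀ (ys : List String) (k : Nat), x.drop k = ys → ∀ acc,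
      (PySem.List.enumerate ys (k : Int)).foldl (pvStepB hosts (d : Int)) acc =
      acc ++ pvForm x (d : Int)
        (PySem.List.enumerate (hosts.drop (k * d)) ((k * d : Nat) : Int)) := by
  intro ys
  induction ys with
  | nil =>
    intro k hdrop acc
    have hk : x.length ≤ k := List.drop_eq_nil_iff.mp hdrop
    have : hosts.length ≤ k * d := by
      rw [hlen]; exact Nat.mul_le_mul_right d hk
    rw [List.drop_eq_nil_iff.mpr this]
    simp [PySem.List.enumerate_nil, pvForm]
  | cons v ys' ih =>
    intro k hdrop acc
    have hk : k < x.length := by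
      by_contra hge
      rw [List.drop_eq_nil_iff.mpr (by omega)] at hdrop
      exact (List.cons_ne_nil _ _) hdrop.symm
    have hxv : x[k]? = some v := by
      have h0 := congrArg (fun l : List String => l[0]?) hdrop
      simpa using h0
    have hbound : k * d + d ≤ hosts.length := by
      have h1 : (k + 1) * d ≤ x.length * d := Nat.mul_le_mul_right d hk
      rw [Nat.succ_mul] at h1
      omega
    rw [PySem.List.enumerate_cons, List.foldl_cons]
    -- the step at (k, v): the slice is exactly the chunk (hosts.drop (k*d)).take d
    have hslice : PySem.List.slice hosts (some ((k : Int) * (d : Int)))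
        (some (((k : Int) + 1) * (d : Int))) = (hosts.drop (k * d)).take d := by
      have h1 : ((k : Int) * (d : Int)) = ((k * d : Nat) : Int) := by push_cast; ring
      have h2 : (((k : Int) + 1) * (d : Int)) = ((k * d + d : Nat) : Int) := by push_cast; ring
      rw [h1, h2, PySem.List.slice_natCast]
      congr 1
      omega
    have hchunklen : ((hosts.drop (k * d)).take d).length = d := by
      simp [List.length_take, List.length_drop]
      omega
    -- split the closed form at the chunk boundary
    have hsplit : hosts.drop (k * d) =
        (hosts.drop (k * d)).take d ++ hosts.drop ((k + 1) * d) := by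
      rw [Nat.succ_mul, ← List.drop_drop]
      exact (List.take_append_drop d (hosts.drop (k * d))).symm
    rw [hsplit, PySem.List.enumerate_append, hchunklen]
    have hstep : pvStepB hosts (d : Int) acc ((k : Int), v) =
        acc ++ pvForm x (d : Int)
          (PySem.List.enumerate ((hosts.drop (k * d)).take d) ((k * d : Nat) : Int)) := by
      unfold pvStepB pvForm
      rw [hslice]
      congr 1
      -- pointwise: each index in the chunk floor-divides to k, and x[k] = v
      have hmap : ∀ p ∈ PySem.List.enumerate ((hosts.drop (k * d)).take d) ((k * d : Nat) : Int),
          [("hostname", p.2), ("value", PySem.List.pyGetD x (PySem.Int.floordiv p.1 (d : Int)) "")] =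
          [("hostname", p.2), ("value", v)] := by
        intro p hp
        obtain ⟨j, hj, hpj⟩ := (PySem.List.mem_enumerate_iff _ _ _).mp hp
        rw [hchunklen] at hj
        have hfd : PySem.Int.floordiv (((k * d : Nat) : Int) + (j : Nat)) (d : Int) = (k : Int) := by
          have h1 : (((k * d : Nat) : Int) + (j : Nat)) = ((k * d + j : Nat) : Int) := by push_cast; ring
          rw [h1, PySem.Int.floordiv_natCast]
          congr 1
          rw [Nat.add_comm, Nat.add_mul_div_right j k (by omega), Nat.div_eq_of_lt hj]
          omega
        rw [hpj]
        simp only [hfd]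
        have : PySem.List.pyGetD x ((k : Nat) : Int) "" = v := by
          rw [PySem.List.pyGetD_natCast]
          simp [List.getD_eq_getElem?_getD, hxv]
        rw [this]
      have h2 := List.map_congr_left hmap
      rw [h2, show (fun p : Int × String => [("hostname", p.2), ("value", v)]) =
          (fun host : String => [("hostname", host), ("value", v)]) ∘ Prod.snd from rfl,
        ← List.map_map, PySem.List.map_snd_enumerate]
    rw [hstep]
    have hys' : x.drop (k + 1) = ys' := by
      rw [← List.tail_drop, hdrop]
      rfl
    have hcast1 : ((k : Int) + 1) = ((k + 1 : Nat) : Int) := by push_cast; ring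
    have hcast2 : (((k * d : Nat) : Int) + (d : Nat)) = (((k + 1) * d : Nat) : Int) := by
      push_cast; ring
    rw [hcast1, hcast2, ih (k + 1) hys']
    simp [pvForm]

-- ===== VERDICT (by name: the statement is the Claim_ definition above) =====
theorem get_host_metric_data_spec : Claim_equal_get_host_metric_data := by
  intro data _ hPre
  obtain ⟨-, -, hm, hdvd⟩ := hPre
  unfold Spec_get_host_metric_data get_host_metric_data get_host_metric_data_alt
  set hosts := pvLookup data "hostname_series" with hh
  set x := pvLookup data "x_axis" with hx
  simp only
  -- Nat quotient d and the port's Int divide agree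
  have hdiv : PySem.Int.floordiv (hosts.length : Int) (x.length : Int) =
      ((hosts.length / x.length : Nat) : Int) := PySem.Int.floordiv_natCast _ _
  have hlen : hosts.length = x.length * (hosts.length / x.length) :=
    (Nat.mul_div_cancel' hdvd).symm
  have hB := pv_loopB x hosts (hosts.length / x.length) hlen x 0 (by simp) []
  rw [hdiv]
  rw [show ((0 : Nat) : Int) = (0 : Int) from rfl] at hB
  simp only [Nat.zero_mul, List.drop_zero] at hB
  rw [hB]
  rcases List.eq_nil_or_concat hosts with hnil | ⟨_, _, hcons⟩
  · rw [hnil]; simp [PySem.List.enumerate_nil, pvForm]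
  · have hn : 0 < hosts.length := by rw [hcons]; simp
    have hge : x.length ≤ hosts.length := Nat.le_of_dvd hn hdvd
    have hd1 : 1 ≤ (((hosts.length / x.length : Nat)) : Int) := by
      exact_mod_cast Nat.one_le_div_iff hm |>.mpr hge
    have := pv_loop_eq x ((hosts.length / x.length : Nat) : Int) hd1 hosts 0 []
    simpa using this
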